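-- pv_equiv track=rewrite | github.com/emnlp-2314/emnlp-2314 | codes/extraction/extraction_metrics.py | is_valid_mapping
-- ===== SOURCE A (Python) =====
-- def is_valid_mapping(mapping):
--     reverse_mapping = {}
--     for k in mapping:
--         v = mapping[k]
--         if v not in reverse_mapping:
--             reverse_mapping[v] = [k]
--         else:
--             reverse_mapping[v].append(k)
--
--     for v in reverse_mapping:
--         if v == -1: continue
--         if len(reverse_mapping[v]) > 1:
--             return False
--
--     return True
-- ===== SOURCE B (Python) =====
-- def is_valid_mapping(mapping):
--     seen = set()
--     for v in mapping.values():
--         if v == -1: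
--             continue
--         if v in seen:
--             return False
--         seen.add(v)
--     return True
-- ===== Notes on version B (the rewrite author's own statement) =====
-- stated objective: simpler
-- what changed: Replaces A's two-pass structure (build a reverse dict mapping each value to the list of its keys, then scan that dict for a non -1 value with more than one key) by a single early-exit pass over mapping.values() that keeps a set of already-seen non -1 values.
import Mathlib
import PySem

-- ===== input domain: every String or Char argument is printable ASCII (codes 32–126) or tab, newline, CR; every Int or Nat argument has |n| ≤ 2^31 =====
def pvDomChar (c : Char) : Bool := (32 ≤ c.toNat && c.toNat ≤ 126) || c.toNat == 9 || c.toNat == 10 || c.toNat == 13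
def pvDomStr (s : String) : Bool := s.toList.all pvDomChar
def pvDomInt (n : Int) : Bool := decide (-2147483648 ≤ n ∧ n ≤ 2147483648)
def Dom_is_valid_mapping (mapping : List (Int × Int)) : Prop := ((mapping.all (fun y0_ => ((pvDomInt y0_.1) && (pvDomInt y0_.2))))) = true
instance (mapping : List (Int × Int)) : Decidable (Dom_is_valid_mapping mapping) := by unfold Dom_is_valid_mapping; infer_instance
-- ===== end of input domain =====

-- B replaces A's build-reverse-dict-then-scan two-pass structure with one early-exit
-- pass over the values keeping a set of seen non-(-1) values (objective: simpler).

-- ===== PORT A =====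
-- first loop: for k in mapping: v = mapping[k]; group keys by value.
-- mapping[k] always succeeds (k is a key of mapping), so the .getD default 0 is unreachable.
def pvBuildRev (m : PySem.Dict Int Int) (kvs : List (Int × Int)) : PySem.Dict Int (List Int) :=
  kvs.foldl (fun rm kv =>
    let v := (m.get? kv.1).getD 0
    if rm.contains v = false then rm.insert v [kv.1]
    else rm.insert v (rm.getD v [] ++ [kv.1])) PySem.Dict.empty

-- second loop: for v in reverse_mapping: if v == -1: continue; if len(rm[v]) > 1: return False
def pvCheckRev (rev : PySem.Dict Int (List Int)) : List Int → Bool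
  | [] => true
  | v :: rest =>
    if v = -1 then pvCheckRev rev rest
    else if (rev.getD v []).length > 1 then false
    else pvCheckRev rev rest

def is_valid_mapping (mapping : List (Int × Int)) : Bool :=
  let m := PySem.Dict.mk mapping
  let rev := pvBuildRev m mapping
  pvCheckRev rev rev.keys

-- ===== PORT B =====
def pvSeenLoop (seen : PySem.Set Int) : List Int → Bool
  | [] => true
  | v :: rest =>
    if v = -1 then pvSeenLoop seen rest
    else if PySem.Set.contains seen v then false
    else pvSeenLoop (PySem.Set.add seen v) rest

def is_valid_mapping_alt (mapping : List (Int × Int)) : Bool :=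
  pvSeenLoop PySem.Set.empty (PySem.Dict.mk mapping).values

-- ===== PRECONDITION & SPEC =====
-- Pre_ excludes association lists with duplicate keys: those represent no Python dict
-- (A's argument is a dict, whose keys are necessarily distinct), so nothing is excluded
-- on which the Python A runs at all.
def Pre_is_valid_mapping (mapping : List (Int × Int)) : Prop :=
  (mapping.map Prod.fst).Nodup
instance (mapping : List (Int × Int)) : Decidable (Pre_is_valid_mapping mapping) := by
  unfold Pre_is_valid_mapping; infer_instance

def pvWitness_is_valid_mapping : (List (Int × Int)) := [(0, 1), (2, -1), (3, -1)]

def Spec_is_valid_mapping (mapping : List (Int × Int)) (out : Bool) : Prop := out = is_valid_mapping_alt mapping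
instance (mapping : List (Int × Int)) (out : Bool) : Decidable (Spec_is_valid_mapping mapping out) := by unfold Spec_is_valid_mapping; infer_instance

-- ===== CLAIM (what is proved, stated in full; the proofs are below) =====
def Claim_equal_is_valid_mapping : Prop := ∀ (mapping : List (Int × Int)), Dom_is_valid_mapping mapping → Pre_is_valid_mapping mapping → Spec_is_valid_mapping mapping (is_valid_mapping mapping)

-- ===== LEMMAS AND PROOFS =====

-- With distinct keys, the lookup mapping[k] for the pair (k, v) returns v,
-- so A's build loop is a modify-by-value loop over the pairs.
theorem pvBuildRev_eq_modify (mapping : List (Int × Int))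
    (h : (mapping.map Prod.fst).Nodup) :
    pvBuildRev (PySem.Dict.mk mapping) mapping =
      mapping.foldl (fun rm kv => rm.modify kv.2 [] (· ++ [kv.1])) PySem.Dict.empty := by
  unfold pvBuildRev
  apply PySem.List.foldl_congr_mem
  intro rm kv hmem
  have hget : (PySem.Dict.mk mapping).get? kv.1 = some kv.2 := by
    apply PySem.Dict.get?_of_mem_items
    · exact hmem
    · simpa [PySem.Dict.keys_mk] using h
  simp only [hget, Option.getD_some, PySem.Dict.modify, PySem.Dict.getD_eq_get?_getD]
  by_cases hc : rm.contains kv.2 = true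
  · simp [hc]
  · have hn : rm.get? kv.2 = none := by
      cases hg : rm.get? kv.2 with
      | none => rfl
      | some l =>
        exfalso; apply hc
        rw [PySem.Dict.contains_eq_isSome_get?, hg]; rfl
    simp [hc, hn]

theorem pvCheckRev_eq_all (rev : PySem.Dict Int (List Int)) (ks : List Int) :
    pvCheckRev rev ks =
      ks.all (fun v => decide (v = -1) || decide ((rev.getD v []).length ≤ 1)) := by
  induction ks with
  | nil => rfl
  | cons v rest ih =>
    simp only [pvCheckRev, List.all_cons]
    by_cases h1 : v = -1
    · simp [h1, ih]
    · by_cases h2 : (rev.getD v []).length > 1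
      · have : ¬ (rev.getD v []).length ≤ 1 := by omega
        simp [h1, h2, this]
      · have : (rev.getD v []).length ≤ 1 := by omega
        simp [h1, h2, this, ih]

theorem pvSeenLoop_eq_true_iff (l : List Int) (seen : PySem.Set Int) :
    pvSeenLoop seen l = true ↔
      ((l.filter (fun v => v ≠ -1)).Nodup ∧ ∀ v ∈ l.filter (fun v => v ≠ -1), v ∉ seen) := by
  induction l generalizing seen with
  | nil => simp [pvSeenLoop]
  | cons v rest ih =>
    by_cases h1 : v = -1
    · simp only [pvSeenLoop, if_pos h1, ih, List.filter_cons]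
      simp [h1]
    · by_cases h2 : PySem.Set.contains seen v = true
      · simp only [pvSeenLoop, if_neg h1, if_pos h2]
        constructor
        · intro h; cases h
        · rintro ⟨-, hdisj⟩
          exfalso
          exact hdisj v (by simp [h1]) (by simpa [PySem.Set.contains_iff] using h2)
      · simp only [pvSeenLoop, if_neg h1, if_neg h2, ih]
        have hvnot : v ∉ seen := by
          intro hv; exact h2 ((PySem.Set.contains_iff seen v).mpr hv)
        have hfc : (v :: rest).filter (fun v => v ≠ -1) = v :: rest.filter (fun v => v ≠ -1) := by
          simp [h1]
        rw [hfc]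
        constructor
        · rintro ⟨hnd, hdisj⟩
          refine ⟨?_, ?_⟩
          · refine List.Nodup.cons ?_ hnd
            intro hvmem
            exact hdisj v hvmem (by simp [PySem.Set.mem_add])
          · intro w hw hwseen
            rcases List.mem_cons.mp hw with rfl | hwrest
            · exact hvnot hwseen
            · exact hdisj w hwrest (by simp [PySem.Set.mem_add, hwseen])
        · rintro ⟨hnd, hdisj⟩
          rcases List.nodup_cons.mp hnd with ⟨hvnotin, hnd'⟩
          refine ⟨hnd', ?_⟩
          intro w hw hwadd
          rcases (PySem.Set.mem_add seen v w).mp hwadd with hws | rfl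
          · exact hdisj w (List.mem_cons_of_mem _ hw) hws
          · exact hvnotin hw

-- counting a value among the swapped pairs is counting it among the values
theorem pvCount_swap (mapping : List (Int × Int)) (c : Int) :
    (mapping.filter (fun kv => kv.2 == c)).length = (mapping.map Prod.snd).count c := by
  rw [List.count, List.countP_map, ← List.countP_eq_length_filter]
  rfl

theorem pvMain (mapping : List (Int × Int)) (h : (mapping.map Prod.fst).Nodup) :
    is_valid_mapping mapping = is_valid_mapping_alt mapping := by
  have hA : is_valid_mapping mapping =
      pvCheckRev (mapping.foldl (fun rm kv => rm.modify kv.2 [] (· ++ [kv.1])) PySem.Dict.empty)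
        (mapping.foldl (fun rm kv => rm.modify kv.2 [] (· ++ [kv.1])) PySem.Dict.empty).keys := by
    show pvCheckRev (pvBuildRev (PySem.Dict.mk mapping) mapping)
        (pvBuildRev (PySem.Dict.mk mapping) mapping).keys = _
    rw [pvBuildRev_eq_modify mapping h]
  rw [hA, Bool.eq_iff_iff]
  have hfold :
      mapping.foldl (fun rm kv => rm.modify kv.2 [] (· ++ [kv.1])) PySem.Dict.empty =
      mapping.foldl (fun (rm : PySem.Dict Int (List Int)) kv =>
        rm.modify ((fun (p : Int × Int) => p.2) kv) [] ((fun (rm : PySem.Dict Int (List Int)) (kv : Int × Int) => (· ++ [kv.1])) rm kv)) PySem.Dict.empty := rfl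
  have hkeys :
      (mapping.foldl (fun rm kv => rm.modify kv.2 [] (· ++ [kv.1])) PySem.Dict.empty).keys
        = PySem.Set.ofList (mapping.map Prod.snd) := by
    rw [hfold, PySem.Dict.keys_foldl_modify_key]
    simp [PySem.Dict.keys]
    rfl
  have hgetD : ∀ c : Int,
      (mapping.foldl (fun rm kv => rm.modify kv.2 [] (· ++ [kv.1])) PySem.Dict.empty).getD c []
        = ((mapping.map (fun kv => (kv.2, kv.1))).filter (fun p => p.1 == c)).map (·.2) := by
    intro c
    have := PySem.Dict.getD_foldl_modify_append
      (mapping.map (fun kv => (kv.2, kv.1))) (PySem.Dict.empty (κ := Int) (ν := List Int)) c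
    rw [List.foldl_map] at this
    simpa [PySem.Dict.getD_empty] using this
  have hlen : ∀ c : Int,
      ((mapping.foldl (fun rm kv => rm.modify kv.2 [] (· ++ [kv.1])) PySem.Dict.empty).getD c []).length
        = (mapping.map Prod.snd).count c := by
    intro c
    rw [hgetD c, List.length_map, ← pvCount_swap]
    rw [List.filter_map, List.length_map]
    rfl
  rw [pvCheckRev_eq_all, hkeys]
  -- B side
  unfold is_valid_mapping_alt
  rw [PySem.Dict.values_mk]
  rw [pvSeenLoop_eq_true_iff]
  have hBnoseen : ∀ w ∈ (mapping.map (fun x => x.2)).filter (fun v => v ≠ -1),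
      w ∉ (PySem.Set.empty : PySem.Set Int) := by
    intro w _ hw; cases hw
  constructor
  · intro hA
    refine ⟨?_, hBnoseen⟩
    rw [List.nodup_iff_count_le_one]
    intro a
    by_cases ha : a = -1
    · have : ¬ ((fun v => decide ¬ v = -1) a = true) := by simp [ha]
      calc List.count a (List.filter (fun v => decide ¬v = -1) (mapping.map fun x => x.2))
          ≤ 0 := by
            rw [Nat.le_zero, List.count_eq_zero]
            intro hmem
            exact this (List.mem_filter.mp hmem).2
        _ ≤ 1 := by omega
    · rw [List.count_filter (by simp [ha])]
      by_cases hmem : a ∈ (mapping.map fun x => x.2)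
      · have := List.all_eq_true.mp hA a ((PySem.Set.mem_ofList _ a).mpr hmem)
        rcases Bool.or_eq_true_iff.mp this with h1 | h2
        · exact absurd (of_decide_eq_true h1) ha
        · have := of_decide_eq_true h2
          rw [hlen a] at this
          simpa using this
      · rw [List.count_eq_zero.mpr hmem]; omega
  · rintro ⟨hnd, -⟩
    rw [List.all_eq_true]
    intro a hamem
    have hamem' : a ∈ (mapping.map fun x => x.2) := (PySem.Set.mem_ofList _ a).mp hamem
    by_cases ha : a = -1
    · simp [ha]
    · have := (List.nodup_iff_count_le_one.mp hnd) a
      rw [List.count_filter (by simp [ha])] at this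
      have : ((mapping.foldl (fun rm kv => rm.modify kv.2 [] (· ++ [kv.1])) PySem.Dict.empty).getD a []).length ≤ 1 := by
        rw [hlen a]; simpa using this
      simp [this]

-- ===== VERDICT (by name: the statement is the Claim_ definition above) =====
theorem is_valid_mapping_spec : Claim_equal_is_valid_mapping := by
  intro mapping _ hpre
  unfold Spec_is_valid_mapping
  exact pvMain mapping hpre
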